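-- pv_equiv track=rewrite | github.com/Krishn1101/Problems-on-Python | Count_Even_Letters.py | count
-- ===== SOURCE A (Python) =====
-- def count(s):
--     freq = {}
--     for i in s:
--         if i not in freq:
--             freq[i] = 1
--         else:
--             freq[i] += 1
--
--     cnt = 0
--     for i in freq.values():
--         if i%2==0:
--             cnt+=1
--     return cnt
-- ===== SOURCE B (Python) =====
-- def count(s):
--     odd = set()
--     for ch in s:
--         if ch in odd:
--             odd.discard(ch)
--         else:
--             odd.add(ch)
--     return len(set(s)) - len(odd)
-- ===== Notes on version B (the rewrite author's own statement) =====
-- stated objective: alternative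
-- what changed: Replaces the frequency dictionary and second counting pass by a single pass maintaining a parity-toggled set of odd-count characters, returning len(set(s)) - len(odd).
import Mathlib
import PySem

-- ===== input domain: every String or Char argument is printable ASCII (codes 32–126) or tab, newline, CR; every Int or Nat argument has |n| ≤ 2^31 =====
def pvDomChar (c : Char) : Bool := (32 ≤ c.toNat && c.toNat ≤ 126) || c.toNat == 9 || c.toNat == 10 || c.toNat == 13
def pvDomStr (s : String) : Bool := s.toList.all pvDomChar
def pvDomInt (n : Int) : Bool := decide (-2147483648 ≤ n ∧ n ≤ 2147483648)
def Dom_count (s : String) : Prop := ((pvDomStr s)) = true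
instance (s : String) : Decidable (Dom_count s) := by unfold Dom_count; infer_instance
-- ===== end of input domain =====

-- B replaces A's frequency dictionary + second counting pass by one pass toggling a set of
-- odd-count characters, returning len(set(s)) - len(odd) (alternative decomposition, same cost).


-- ===== PORT A =====
def count (s : String) : Int :=
  (((s.toList.foldl
      (fun freq i =>
        if freq.contains i = false then freq.insert i 1
        else freq.modify i 0 (· + 1))            -- freq[i] += 1 (key present)
      PySem.Dict.empty)).values).foldl
    (fun cnt i => if PySem.Int.mod i 2 = 0 then cnt + 1 else cnt) 0

-- ===== PORT B =====
-- one step of B's loop: toggle ch's membership in the set 'odd'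
def pyToggle (odd : PySem.Set Char) (ch : Char) : PySem.Set Char :=
  if odd.contains ch then PySem.Set.discard odd ch else PySem.Set.add odd ch

def count_alt (s : String) : Int :=
  PySem.Set.len (PySem.Set.ofList s.toList) -
    PySem.Set.len (s.toList.foldl pyToggle PySem.Set.empty)

-- ===== PRECONDITION & SPEC =====
def Spec_count (s : String) (out : Int) : Prop := out = count_alt s
instance (s : String) (out : Int) : Decidable (Spec_count s out) := by unfold Spec_count; infer_instance

-- ===== CLAIM (what is proved, stated in full; the proofs are below) =====
def Claim_equal_count : Prop := ∀ (s : String), Dom_count s → Spec_count s (count s)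

-- ===== LEMMAS AND PROOFS =====

-- A's dictionary loop step is exactly the Counter step (when the key is absent,
-- inserting 1 is modifying from default 0 by +1).
theorem countStep_eq_counterStep (d : PySem.Dict Char Int) (i : Char) :
    (if d.contains i = false then d.insert i 1 else d.modify i 0 (· + 1)) =
      d.modify i 0 (· + 1) := by
  by_cases h : d.contains i
  · simp [h]
  · simp only [Bool.not_eq_true] at h
    simp [h, PySem.Dict.modify, PySem.Dict.getD_of_not_contains d 0 h]

-- B's toggled set after the loop: no duplicates, and a character is in it iff its
-- membership in the initial set agrees with the evenness of its count in the list.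
theorem toggle_inv (L : List Char) (init : PySem.Set Char) (h : init.Nodup) :
    (L.foldl pyToggle init).Nodup ∧
      ∀ c, c ∈ L.foldl pyToggle init ↔ (c ∈ init ↔ Even (L.count c)) := by
  induction L generalizing init with
  | nil => exact ⟨h, fun c => by simp⟩
  | cons x t ih =>
    have hstep : (pyToggle init x).Nodup := by
      unfold pyToggle
      by_cases hx : x ∈ init
      · simp only [PySem.Set.contains, List.contains_eq_mem, hx, decide_true, if_true]
        exact PySem.Set.nodup_discard init x h
      · simp only [PySem.Set.contains, List.contains_eq_mem, hx, decide_false,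
          Bool.false_eq_true, if_false]
        exact PySem.Set.nodup_add init x h
    have hmem : ∀ c, c ∈ pyToggle init x ↔ ¬ (c ∈ init ↔ c = x) := by
      intro c
      unfold pyToggle
      by_cases hx : x ∈ init
      · simp only [PySem.Set.contains, List.contains_eq_mem, hx, decide_true, if_true,
          PySem.Set.mem_discard]
        by_cases hcx : c = x
        · subst hcx; simp [hx]
        · simp [hcx]
      · simp only [PySem.Set.contains, List.contains_eq_mem, hx, decide_false,
          Bool.false_eq_true, if_false, PySem.Set.mem_add]
        by_cases hcx : c = x
        · subst hcx; simp [hx]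
        · simp [hcx]
    refine ⟨(ih (pyToggle init x) hstep).1, ?_⟩
    intro c
    rw [List.foldl_cons, (ih (pyToggle init x) hstep).2 c, hmem c]
    by_cases hcx : c = x
    · subst hcx
      rw [List.count_cons_self, Nat.even_add_one]
      tauto
    · rw [List.count_cons]
      have hxc : (x == c) = false := by simpa using fun h => hcx h.symm
      simp [hcx, hxc]
-- with the empty initial set: membership in 'odd' is exactly odd count
theorem mem_odd_iff (L : List Char) (c : Char) :
    c ∈ L.foldl pyToggle PySem.Set.empty ↔ ¬ Even (L.count c) := by
  have := (toggle_inv L PySem.Set.empty List.nodup_nil).2 c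
  simpa [PySem.Set.empty] using this

-- 'odd' is a permutation of the odd-count part of set(L)
theorem odd_length_eq (L : List Char) :
    (L.foldl pyToggle PySem.Set.empty).length =
      ((PySem.Set.ofList L).filter (fun c => !decide (Even (L.count c)))).length := by
  apply List.Perm.length_eq
  rw [List.perm_ext_iff_of_nodup (toggle_inv L PySem.Set.empty List.nodup_nil).1
      (((PySem.Set.nodup_ofList L)).filter _)]
  intro c
  rw [mem_odd_iff]
  simp only [List.mem_filter, PySem.Set.mem_ofList, Bool.not_eq_eq_eq_not, Bool.not_true,
    decide_eq_false_iff_not]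
  constructor
  · intro h
    refine ⟨?_, h⟩
    have h0 : L.count c ≠ 0 := fun h0 => h (by simp [h0])
    exact List.count_pos_iff.mp (Nat.pos_of_ne_zero h0)
  · exact fun h => h.2

-- the parity test A runs on a counter value is evenness of the count
theorem mod_two_count (L : List Char) (c : Char) :
    (PySem.Int.mod ((L.count c : Int)) 2 = 0) ↔ Even (L.count c) := by
  rw [PySem.Int.mod_eq_zero_iff_dvd, even_iff_two_dvd]
  exact ⟨fun h => by exact_mod_cast h, fun h => by exact_mod_cast h⟩

-- ===== VERDICT (by name: the statement is the Claim_ definition above) =====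
theorem count_spec : Claim_equal_count := by
  intro s _
  unfold Spec_count count count_alt
  set L := s.toList with hL
  -- A's dictionary is the Counter
  have hfreq :
      (L.foldl
        (fun freq i =>
          if freq.contains i = false then freq.insert i 1
          else freq.modify i 0 (· + 1))
        PySem.Dict.empty) = PySem.Dict.counter L := by
    rw [PySem.Dict.counter_eq_foldl]
    apply PySem.List.foldl_congr_mem
    intro acc x _
    exact countStep_eq_counterStep acc x
  rw [hfreq, PySem.List.foldl_ite_add_one (p := fun i => PySem.Int.mod i 2 = 0)]
  have hvals : (PySem.Dict.counter L).values =
      (PySem.Set.ofList L).map (fun k => (L.count k : Int)) := by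
    simp only [PySem.Dict.values, PySem.Dict.items_counter, List.map_map]
    rfl
  rw [hvals, List.countP_map, PySem.Set.len, PySem.Set.len, odd_length_eq]
  have hsplit :
      (PySem.Set.ofList L).countP
          ((fun i => decide (PySem.Int.mod i 2 = 0)) ∘ fun k => (L.count k : Int)) =
        (PySem.Set.ofList L).countP (fun c => decide (Even (L.count c))) := by
    apply List.countP_congr
    intro c _
    simp only [Function.comp, decide_eq_true_eq]
    exact mod_two_count L c
  rw [hsplit]
  have h1 : ((PySem.Set.ofList L).filter (fun c => !decide (Even (L.count c)))).length =
      (PySem.Set.ofList L).countP (fun c => !decide (Even (L.count c))) := by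
    rw [List.countP_eq_length_filter]
  rw [h1]
  have h2 := List.length_eq_countP_add_countP (l := PySem.Set.ofList L)
    (p := fun c => decide (Even (L.count c)))
  have h3 : (PySem.Set.ofList L).countP (fun a => decide ¬(decide (Even (L.count a)) = true)) =
      (PySem.Set.ofList L).countP (fun c => !decide (Even (L.count c))) := by
    apply List.countP_congr
    intro c _
    simp
  omega
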